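-- pv_equiv track=rewrite | github.com/spartan289/PycharmProjects | dsanda/numsequence.py | getscoreDifference
-- ===== SOURCE A (Python) =====
-- def getscoreDifference(numSeq):
--     f=0
--     s=0
--     i=0
--     flag=0
--     n=len(numSeq)
--     while i<n:
--         if flag%2==0:
--             f+=numSeq[i]
--             x=numSeq[i]
--
--             numSeq.pop(i)
--             if x%2==0:
--                 numSeq.reverse()
--             n-=1
--             flag=1
--         else:
--             s+=numSeq[i]
--             x=numSeq[i]
--             numSeq.pop(i)
--             if x%2==0:
--                 numSeq.reverse()
--             n-=1
--             flag=0
--     return f-s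
-- ===== SOURCE B (Python) =====
-- def getscoreDifference(numSeq):
--     # O(n) two-pointer version: instead of popping index 0 and reversing the
--     # list (A's O(n^2) mutation), keep the live segment [lo..hi] of the input
--     # and a direction flag that flips whenever an even value is consumed.
--     # (Does not mutate numSeq; A empties it in place.)
--     lo, hi = 0, len(numSeq) - 1
--     front = True
--     diff = 0
--     sign = 1
--     while lo <= hi:
--         if front:
--             x = numSeq[lo]
--             lo += 1
--         else:
--             x = numSeq[hi]
--             hi -= 1
--         diff += sign * x
--         if x % 2 == 0:
--             front = not front
--         sign = -sign
--     return diff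
-- ===== Notes on version B (the rewrite author's own statement) =====
-- stated objective: faster
-- what changed: Replaced A's destructive loop (pop the head and reverse the whole remaining list on every even value, O(n) work per element) by a non-mutating two-pointer scan over the fixed input with a direction flag flipped on even values and an alternating sign accumulator.
import Mathlib
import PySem

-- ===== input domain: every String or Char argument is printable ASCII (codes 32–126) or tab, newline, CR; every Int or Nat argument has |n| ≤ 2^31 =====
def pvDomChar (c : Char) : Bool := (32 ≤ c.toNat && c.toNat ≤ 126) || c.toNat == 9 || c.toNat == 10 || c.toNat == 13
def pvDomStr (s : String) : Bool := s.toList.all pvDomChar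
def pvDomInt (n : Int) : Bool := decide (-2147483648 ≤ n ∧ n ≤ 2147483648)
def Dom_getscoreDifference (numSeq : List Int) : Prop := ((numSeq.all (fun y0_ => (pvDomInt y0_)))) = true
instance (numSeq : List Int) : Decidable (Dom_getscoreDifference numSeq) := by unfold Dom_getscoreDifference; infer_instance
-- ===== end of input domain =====

-- B replaces A's O(n^2) pop(0)/reverse mutation loop by an O(n) two-pointer scan with a
-- direction flag (equivalence is about the return value only: A empties numSeq in place, B does not mutate it).

-- ===== PORT A =====
-- A's while loop: i stays 0, each iteration pops the head, adds it to f or s by flag,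
-- and reverses the remaining list when the popped value is even.
def pvGoA (L : List Int) (f s flag : Int) : Int :=
  match L with
  | [] => f - s
  | x :: t =>
    if PySem.Int.mod flag 2 == 0 then
      pvGoA (if PySem.Int.mod x 2 == 0 then t.reverse else t) (f + x) s 1
    else
      pvGoA (if PySem.Int.mod x 2 == 0 then t.reverse else t) f (s + x) 0
termination_by L.length
decreasing_by all_goals (split <;> simp)

def getscoreDifference (numSeq : List Int) : Int :=
  pvGoA numSeq 0 0 0

-- ===== PORT B =====
-- two-pointer loop of Source B; the index (lo resp. hi) is always in range, so Python's
-- numSeq[·] is ported as pyGetD with default 0 (the default is never used).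
def pvGoB (numSeq : List Int) (lo hi : Int) (front : Bool) (diff sign : Int) : Int :=
  if lo ≤ hi then
    let x := if front then PySem.List.pyGetD numSeq lo 0 else PySem.List.pyGetD numSeq hi 0
    let lo' := if front then lo + 1 else lo
    let hi' := if front then hi else hi - 1
    let diff' := diff + sign * x
    let front' := if PySem.Int.mod x 2 == 0 then !front else front
    pvGoB numSeq lo' hi' front' diff' (-sign)
  else diff
termination_by (hi + 1 - lo).toNat
decreasing_by all_goals (split <;> simp <;> omega)

def getscoreDifference_alt (numSeq : List Int) : Int :=
  pvGoB numSeq 0 ((numSeq.length : Int) - 1) true 0 1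

-- ===== PRECONDITION & SPEC =====
def Spec_getscoreDifference (numSeq : List Int) (out : Int) : Prop := out = getscoreDifference_alt numSeq
instance (numSeq : List Int) (out : Int) : Decidable (Spec_getscoreDifference numSeq out) := by unfold Spec_getscoreDifference; infer_instance

-- ===== CLAIM (what is proved, stated in full; the proofs are below) =====
def Claim_equal_getscoreDifference : Prop := ∀ (numSeq : List Int), Dom_getscoreDifference numSeq → Spec_getscoreDifference numSeq (getscoreDifference numSeq)

-- ===== LEMMAS AND PROOFS =====

-- the segment numSeq[lo..hi] that B still has in play
def pvSeg (numSeq : List Int) (lo hi : Int) : List Int :=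
  (numSeq.drop lo.toNat).take (hi + 1 - lo).toNat

lemma pvGoA_shift : ∀ (n : Nat) (L : List Int), L.length = n → ∀ (f s : Int),
    pvGoA L f s 0 = f - s + pvGoA L 0 0 0 ∧ pvGoA L f s 1 = f - s - pvGoA L 0 0 0 := by
  intro n
  induction n with
  | zero => intro L hL f s; match L, hL with
            | [], _ => simp [pvGoA]
  | succ n ih =>
    intro L hL f s
    match L, hL with
    | x :: t, hL =>
      simp at hL
      have ht : (if PySem.Int.mod x 2 == 0 then t.reverse else t).length = n := by
        split <;> simpa
      have h1 := ih _ ht (f + x) s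
      have h0 := ih _ ht f (s + x)
      have hx := ih _ ht x 0
      simp only [pvGoA, zero_add]
      constructor
      · simp only [show PySem.Int.mod (0:Int) 2 == 0 from by decide, if_pos]
        rw [h1.2, hx.2]; ring
      · simp only [show (PySem.Int.mod (1:Int) 2 == 0) = false from by decide]
        simp only [Bool.false_eq_true, if_false,
          show PySem.Int.mod (0:Int) 2 == 0 from by decide, if_pos]
        rw [h0.1, hx.2]; ring

lemma pvGoA_cons (x : Int) (t : List Int) :
    pvGoA (x :: t) 0 0 0 = x - pvGoA (if PySem.Int.mod x 2 == 0 then t.reverse else t) 0 0 0 := by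
  have h := (pvGoA_shift _ (if PySem.Int.mod x 2 == 0 then t.reverse else t) rfl x 0).2
  simp only [pvGoA, zero_add, show PySem.Int.mod (0:Int) 2 == 0 from by decide, if_pos]
  rw [h]; ring

lemma pvSeg_cons (numSeq : List Int) (lo hi : Int) (h0 : 0 ≤ lo) (hle : lo ≤ hi)
    (hh : hi < numSeq.length) :
    pvSeg numSeq lo hi = numSeq[lo.toNat]'(by omega) :: pvSeg numSeq (lo + 1) hi := by
  unfold pvSeg
  rw [show (lo + 1).toNat = lo.toNat + 1 by omega,
      show (hi + 1 - lo).toNat = (hi + 1 - (lo + 1)).toNat + 1 by omega,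
      List.drop_eq_getElem_cons (show lo.toNat < numSeq.length by omega),
      List.take_succ_cons]

lemma pvSeg_snoc (numSeq : List Int) (lo hi : Int) (h0 : 0 ≤ lo) (hle : lo ≤ hi)
    (hh : hi < numSeq.length) :
    pvSeg numSeq lo hi = pvSeg numSeq lo (hi - 1) ++ [numSeq[hi.toNat]'(by omega)] := by
  unfold pvSeg
  rw [show (hi + 1 - lo).toNat = (hi - 1 + 1 - lo).toNat + 1 by omega]
  rw [List.take_add_one]
  have hlen : (numSeq.drop lo.toNat).length = numSeq.length - lo.toNat := by simp
  have hidx : (hi - 1 + 1 - lo).toNat < (numSeq.drop lo.toNat).length := by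
    rw [hlen]
    omega
  rw [List.getElem?_eq_getElem hidx]
  simp only [List.getElem_drop]
  have hix : lo.toNat + (hi - 1 + 1 - lo).toNat = hi.toNat := by omega
  simp only [Option.toList_some]
  congr 1
  simp only [hix]

lemma pvGoB_eq : ∀ (k : Nat) (numSeq : List Int) (lo hi : Int) (front : Bool) (diff sign : Int),
    0 ≤ lo → hi < numSeq.length → (hi + 1 - lo).toNat = k →
    pvGoB numSeq lo hi front diff sign =
      diff + sign * pvGoA (if front then pvSeg numSeq lo hi else (pvSeg numSeq lo hi).reverse) 0 0 0 := by
  intro k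
  induction k with
  | zero =>
    intro numSeq lo hi front diff sign h0 hh hk
    have hlt : ¬ lo ≤ hi := by omega
    rw [pvGoB, if_neg hlt]
    have : pvSeg numSeq lo hi = [] := by
      unfold pvSeg
      rw [show (hi + 1 - lo).toNat = 0 from hk]
      simp
    rw [this]
    cases front <;> simp [pvGoA]
  | succ k ih =>
    intro numSeq lo hi front diff sign h0 hh hk
    have hle : lo ≤ hi := by omega
    rw [pvGoB, if_pos hle]
    cases front with
    | true =>
      simp only [if_pos]
      have hx : PySem.List.pyGetD numSeq lo 0 = numSeq[lo.toNat]'(by omega) :=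
        PySem.List.pyGetD_eq_getElem numSeq 0 h0 (by omega)
      rw [hx]
      set x := numSeq[lo.toNat]'(by omega) with hxdef
      rw [ih numSeq (lo + 1) hi _ _ _ (by omega) hh (by omega)]
      rw [pvSeg_cons numSeq lo hi h0 hle hh, pvGoA_cons]
      split
      · simp only [Bool.not_true]
        simp only [if_neg (by simp : ¬ (false = true))]
        ring
      · simp only [if_true]
        ring
    | false =>
      simp only [if_neg (by simp : ¬ (false = true))]
      have hx : PySem.List.pyGetD numSeq hi 0 = numSeq[hi.toNat]'(by omega) :=
        PySem.List.pyGetD_eq_getElem numSeq 0 (by omega) (by omega)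
      rw [hx]
      set x := numSeq[hi.toNat]'(by omega) with hxdef
      rw [ih numSeq lo (hi - 1) _ _ _ h0 (by omega) (by omega)]
      rw [pvSeg_snoc numSeq lo hi h0 hle hh]
      rw [List.reverse_append, List.reverse_singleton, List.singleton_append, pvGoA_cons]
      split
      · simp only [Bool.not_false, if_pos, List.reverse_reverse]
        ring
      · simp only [if_neg (by simp : ¬ (false = true))]
        ring

lemma pvSeg_full (numSeq : List Int) : pvSeg numSeq 0 ((numSeq.length : Int) - 1) = numSeq := by
  unfold pvSeg
  simp only [Int.toNat_zero, List.drop_zero]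
  rw [show ((numSeq.length : Int) - 1 + 1 - 0).toNat = numSeq.length by omega]
  exact List.take_length

-- ===== VERDICT (by name: the statement is the Claim_ definition above) =====
theorem getscoreDifference_spec : Claim_equal_getscoreDifference := by
  intro numSeq _
  unfold Spec_getscoreDifference getscoreDifference getscoreDifference_alt
  rw [pvGoB_eq ((numSeq.length : Int) - 1 + 1 - 0).toNat numSeq 0 ((numSeq.length : Int) - 1)
      true 0 1 (by omega) (by omega) rfl]
  rw [pvSeg_full]
  simp
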